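-- pv_equiv track=rewrite | github.com/saimaneeshareti/python | python/exercises/sets/set_8/ex2.py | check_greater
-- ===== SOURCE A (Python) =====
-- def check_greater(org_list):
--     #define new list
--     new_list=[]
--     #define list to store lengths of elements in orginal list
--     len_list=[]
--     #iterate original list
--     for i in org_list:
--         #adding lengths   to lengths list
--         len_list.append(len(i))
--     #iterate orginal list
--     for j in org_list:
--         if(len(j)==max(len_list)):
--             new_list.append(j)
--     #checking for is element in new list one ,if new list contains more than one returns empty list
--     if(len(new_list)==1):
--         return new_list
--     else:
--         return []
-- ===== SOURCE B (Python) =====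
-- def check_greater(org_list):
--     # Group elements by length in one pass, then inspect the max-length bucket.
--     buckets = {}
--     for x in org_list:
--         buckets.setdefault(len(x), []).append(x)
--     if not buckets:
--         return []
--     b = buckets[max(buckets)]
--     return b if len(b) == 1 else []
-- ===== Notes on version B (the rewrite author's own statement) =====
-- stated objective: faster
-- what changed: Replaces A's two passes (length list, then a filter pass that recomputes max(len_list) on every iteration) with one grouping pass into a length->elements dict followed by a single max over the distinct lengths and one bucket lookup.
import Mathlib
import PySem

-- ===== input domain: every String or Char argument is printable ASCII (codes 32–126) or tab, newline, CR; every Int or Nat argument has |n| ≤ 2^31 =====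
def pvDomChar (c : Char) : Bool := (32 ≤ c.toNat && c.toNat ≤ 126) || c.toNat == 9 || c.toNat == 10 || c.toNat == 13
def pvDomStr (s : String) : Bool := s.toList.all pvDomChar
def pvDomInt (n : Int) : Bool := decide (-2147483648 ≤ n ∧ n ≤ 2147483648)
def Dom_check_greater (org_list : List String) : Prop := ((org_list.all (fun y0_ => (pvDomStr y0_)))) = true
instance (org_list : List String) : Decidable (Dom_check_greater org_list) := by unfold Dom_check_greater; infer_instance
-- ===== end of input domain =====

-- B groups the elements by length in one pass (dict length -> bucket) and inspects only the
-- max-length bucket, instead of A's second pass that recomputes max(len_list) per element.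

-- ===== PORT A =====
def check_greater (org_list : List String) : List String :=
  -- len_list: first loop, appending len(i)
  let len_list : List Int := org_list.foldl (fun acc i => acc ++ [PySem.Str.len i]) []
  -- second loop: if len(j) == max(len_list): new_list.append(j)
  -- (max(len_list) raises only for empty len_list, i.e. the loop body never runs then;
  --  'some (len j) = max? len_list' is exactly the comparison whenever the body runs)
  let new_list : List String := org_list.foldl
    (fun acc j => if some (PySem.Str.len j) = PySem.List.max? len_list (fun y => y)
                  then acc ++ [j] else acc) []
  if new_list.length = 1 then new_list else []

-- ===== PORT B =====
def check_greater_alt (org_list : List String) : List String :=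
  let buckets : PySem.Dict Int (List String) :=
    org_list.foldl (fun d x => d.modify (PySem.Str.len x) [] (fun v => v ++ [x])) PySem.Dict.empty
  if buckets.size = 0 then []
  else
    match PySem.List.max? buckets.keys (fun k => k) with
    | none => []   -- unreachable: keys nonempty here
    | some m =>
      let b := buckets.getD m []   -- buckets[m]; m ∈ keys, so no KeyError
      if b.length = 1 then b else []

-- ===== PRECONDITION & SPEC =====
def Spec_check_greater (org_list : List String) (out : List String) : Prop := out = check_greater_alt org_list
instance (org_list : List String) (out : List String) : Decidable (Spec_check_greater org_list out) := by unfold Spec_check_greater; infer_instance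

-- ===== CLAIM (what is proved, stated in full; the proofs are below) =====
def Claim_equal_check_greater : Prop := ∀ (org_list : List String), Dom_check_greater org_list → Spec_check_greater org_list (check_greater org_list)

-- ===== LEMMAS AND PROOFS =====

-- The grouping loop's bucket at c is exactly the length-c elements, in order.
theorem bucket_eq (org_list : List String) (c : Int) :
    (org_list.foldl (fun d x => d.modify (PySem.Str.len x) [] (fun v => v ++ [x]))
      (PySem.Dict.empty : PySem.Dict Int (List String))).getD c []
      = org_list.filter (fun x => PySem.Str.len x == c) := by
  have h := PySem.Dict.getD_foldl_modify_append
    (org_list.map (fun x => (PySem.Str.len x, x)))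
    (PySem.Dict.empty : PySem.Dict Int (List String)) c
  rw [List.foldl_map] at h
  simpa [List.filter_map, List.map_map, Function.comp_def] using h

-- The grouping loop's keys are the distinct lengths.
theorem keys_eq (org_list : List String) :
    (org_list.foldl (fun d x => d.modify (PySem.Str.len x) [] (fun v => v ++ [x]))
      (PySem.Dict.empty : PySem.Dict Int (List String))).keys
      = PySem.Set.ofList (org_list.map PySem.Str.len) := by
  have h := PySem.Dict.keys_foldl_modify_key org_list PySem.Str.len ([] : List String)
    (fun _ x v => v ++ [x]) (PySem.Dict.empty : PySem.Dict Int (List String))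
  rw [h]
  simp [PySem.Set.update_eq_append_filter, PySem.Dict.keys_empty, PySem.Set.contains]

-- max over a list and max over its distinct elements agree in value (key = id).
theorem max_dedup_eq (xs : List Int) (m₁ m₂ : Int)
    (h₁ : PySem.List.max? xs (fun y => y) = some m₁)
    (h₂ : PySem.List.max? (PySem.Set.ofList xs) (fun y => y) = some m₂) : m₁ = m₂ := by
  have hm₁ := PySem.List.max?_mem h₁
  have hm₂ := PySem.List.max?_mem h₂
  rw [PySem.Set.mem_ofList] at hm₂
  have hle₁ := PySem.List.max?_isMax h₁ m₂ hm₂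
  have hle₂ := PySem.List.max?_isMax h₂ m₁ ((PySem.Set.mem_ofList _ _).mpr hm₁)
  omega

-- ===== VERDICT (by name: the statement is the Claim_ definition above) =====
theorem check_greater_spec : Claim_equal_check_greater := by
  intro org_list _
  unfold Spec_check_greater check_greater check_greater_alt
  rcases org_list with _ | ⟨hd, tl⟩
  · decide
  · set L := hd :: tl with hL
    have hne : (L.map PySem.Str.len) ≠ [] := by simp [hL]
    obtain ⟨m, hm⟩ : ∃ m, PySem.List.max? (L.map PySem.Str.len) (fun y => y) = some m := by
      rcases h : PySem.List.max? (L.map PySem.Str.len) (fun y => y) with _ | m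
      · exact absurd ((PySem.List.max?_eq_none_iff _ _).mp h) hne
      · exact ⟨m, rfl⟩
    have hmemhd : PySem.Str.len hd ∈ PySem.Set.ofList (L.map PySem.Str.len) :=
      (PySem.Set.mem_ofList _ _).mpr (List.mem_map_of_mem (by simp [hL]))
    obtain ⟨m', hm'⟩ : ∃ m', PySem.List.max? (PySem.Set.ofList (L.map PySem.Str.len)) (fun y => y) = some m' := by
      rcases h : PySem.List.max? (PySem.Set.ofList (L.map PySem.Str.len)) (fun y => y) with _ | m'
      · rw [(PySem.List.max?_eq_none_iff _ _).mp h] at hmemhd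
        exact absurd hmemhd (List.not_mem_nil)
      · exact ⟨m', rfl⟩
    have hmm : m = m' := max_dedup_eq _ _ _ hm hm'
    have hsz : ((List.foldl (fun d x => d.modify (PySem.Str.len x) [] fun v => v ++ [x])
        (PySem.Dict.empty : PySem.Dict Int (List String)) L).size = 0) = False := by
      have hk : (List.foldl (fun d x => d.modify (PySem.Str.len x) [] fun v => v ++ [x])
          (PySem.Dict.empty : PySem.Dict Int (List String)) L).size
          = (PySem.Set.ofList (L.map PySem.Str.len)).length := by
        rw [show (List.foldl (fun d x => d.modify (PySem.Str.len x) [] fun v => v ++ [x])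
          (PySem.Dict.empty : PySem.Dict Int (List String)) L).size
          = ((List.foldl (fun d x => d.modify (PySem.Str.len x) [] fun v => v ++ [x])
          (PySem.Dict.empty : PySem.Dict Int (List String)) L).keys).length
          from by simp [PySem.Dict.size, PySem.Dict.keys], keys_eq]
      rw [hk]
      simp only [eq_iff_iff, iff_false]
      intro habs
      rw [List.length_eq_zero_iff.mp habs] at hmemhd
      exact List.not_mem_nil hmemhd
    have hA : (List.foldl (fun acc j =>
        if some (PySem.Str.len j) = PySem.List.max? (L.map PySem.Str.len) (fun y => y)
        then acc ++ [j] else acc) [] L)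
        = L.filter (fun x => PySem.Str.len x == m) := by
      have := PySem.List.foldl_append_ite
        (fun j => some (PySem.Str.len j) = PySem.List.max? (L.map PySem.Str.len) (fun y => y))
        (fun j => j) L []
      simpa [hm] using this
    simp only [PySem.List.foldl_append_singleton_eq_map, List.nil_append,
      bucket_eq, keys_eq, hm', hsz, if_false, hA, ← hmm]
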